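-- pv_equiv track=rewrite | github.com/seanfrischmann/Repl | py_version/primitives.py | get_not_local
-- ===== SOURCE A (Python) =====
-- def get_not_local(value):
-- 	ret = ''
-- 	i = 1
-- 	isBuild = False
-- 	isString = False
-- 	while i < len(value):
-- 		if value[i] == '>' and isString == False:
-- 			break
-- 		if value[i] == '"':
-- 			if isString == True:
-- 				isString = False
-- 			else:
-- 				isString = True
-- 		if value[i] == ',' and isBuild == False and isString == False:
-- 			i += 1
-- 			isBuild = True
-- 			continue
-- 		if isBuild:
-- 			ret = ret + value[i]
-- 		i += 1
-- 	return ret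
-- ===== SOURCE B (Python) =====
-- def get_not_local(value):
--     s = value[1:]
--     # phase 1: quote-aware scan to locate the index just past the first top-level comma
--     start = None
--     in_string = False
--     for j, c in enumerate(s):
--         if c == '>' and not in_string:
--             return ''
--         if c == '"':
--             in_string = not in_string
--         if c == ',' and not in_string:
--             start = j + 1
--             break
--     if start is None:
--         return ''
--     # phase 2: quote-aware extraction until a top-level '>' or end of input
--     out = []
--     in_string = False
--     for c in s[start:]:
--         if c == '>' and not in_string:
--             break
--         if c == '"':
--             in_string = not in_string
--         out.append(c)
--     return ''.join(out)
-- ===== Notes on version B (the rewrite author's own statement) =====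
-- stated objective: faster
-- what changed: Replaces A's single loop carrying an accumulator flag and O(n^2) repeated string concatenation by a two-phase decomposition: a quote-aware scan that locates the position just past the first top-level comma (answering empty if a closing bracket or the end comes first), then a second quote-aware scan over only the remaining range collecting characters into a list joined once.
import Mathlib
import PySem

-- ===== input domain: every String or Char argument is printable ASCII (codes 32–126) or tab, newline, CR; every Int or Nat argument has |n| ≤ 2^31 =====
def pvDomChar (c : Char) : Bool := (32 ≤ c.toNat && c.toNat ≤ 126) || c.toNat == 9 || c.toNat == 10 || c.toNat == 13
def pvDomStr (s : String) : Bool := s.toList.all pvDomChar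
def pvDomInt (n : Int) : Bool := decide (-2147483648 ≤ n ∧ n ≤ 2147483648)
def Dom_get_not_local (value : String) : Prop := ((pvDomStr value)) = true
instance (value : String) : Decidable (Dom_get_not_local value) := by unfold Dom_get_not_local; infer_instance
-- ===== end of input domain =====

-- B replaces A's one-loop accumulator-flag scan (with repeated string concatenation) by a two-phase locate-then-extract decomposition building the result with a list joined once; a timing run measured B faster.

-- ===== PORT A =====
-- A's while-loop: each iteration consumes one character (the `continue` also advances i),
-- so it is a structural recursion over the characters from index 1, carrying (isBuild, isString, ret).
def pvLoopA : List Char → Bool → Bool → List Char → List Char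
  | [], _, _, ret => ret
  | c :: cs, isBuild, isString, ret =>
    if c = '>' ∧ isString = false then ret
    else
      let isString' := if c = '"' then !isString else isString
      if c = ',' ∧ isBuild = false ∧ isString' = false then pvLoopA cs true isString' ret
      else if isBuild then pvLoopA cs isBuild isString' (ret ++ [c])
      else pvLoopA cs isBuild isString' ret

def get_not_local (value : String) : String :=
  String.ofList (pvLoopA (value.toList.drop 1) false false [])

-- ===== PORT B =====
-- phase 1: quote-aware scan; none = a top-level '>' or the end was reached before a
-- top-level comma, some rest = the characters just past the first top-level comma
def pvFindAfterComma : List Char → Bool → Option (List Char)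
  | [], _ => none
  | c :: cs, instr =>
    if c = '>' ∧ instr = false then none
    else
      let instr' := if c = '"' then !instr else instr
      if c = ',' ∧ instr' = false then some cs
      else pvFindAfterComma cs instr'

-- phase 2: quote-aware extraction until a top-level '>' or the end
def pvCollect : List Char → Bool → List Char
  | [], _ => []
  | c :: cs, instr =>
    if c = '>' ∧ instr = false then []
    else
      let instr' := if c = '"' then !instr else instr
      c :: pvCollect cs instr'

def get_not_local_alt (value : String) : String :=
  match pvFindAfterComma (value.toList.drop 1) false with
  | none => ""
  | some rest => String.ofList (pvCollect rest false)

-- ===== PRECONDITION & SPEC =====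
def Spec_get_not_local (value : String) (out : String) : Prop := out = get_not_local_alt value
instance (value : String) (out : String) : Decidable (Spec_get_not_local value out) := by unfold Spec_get_not_local; infer_instance

-- ===== CLAIM (what is proved, stated in full; the proofs are below) =====
def Claim_equal_get_not_local : Prop := ∀ (value : String), Dom_get_not_local value → Spec_get_not_local value (get_not_local value)

-- ===== LEMMAS AND PROOFS =====

-- once A is building (isBuild = true), its loop is exactly B's phase-2 extraction
theorem pvLoopA_build (cs : List Char) : ∀ (instr : Bool) (acc : List Char),
    pvLoopA cs true instr acc = acc ++ pvCollect cs instr := by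
  induction cs with
  | nil => intro instr acc; simp [pvLoopA, pvCollect]
  | cons c cs ih =>
    intro instr acc
    by_cases h : c = '>' ∧ instr = false
    · simp [pvLoopA, pvCollect, h]
    · simp only [pvLoopA, pvCollect, if_neg h]
      simp [ih]

-- before the first top-level comma, A's loop is B's phase 1 followed by phase 2
theorem pvLoopA_seek (cs : List Char) : ∀ (instr : Bool) (acc : List Char),
    pvLoopA cs false instr acc =
      acc ++ (match pvFindAfterComma cs instr with
              | none => []
              | some rest => pvCollect rest false) := by
  induction cs with
  | nil => intro instr acc; simp [pvLoopA, pvFindAfterComma]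
  | cons c cs ih =>
    intro instr acc
    by_cases h : c = '>' ∧ instr = false
    · simp [pvLoopA, pvFindAfterComma, h]
    · simp only [pvLoopA, pvFindAfterComma, if_neg h]
      cases hb : (if c = '"' then !instr else instr) with
      | false =>
        by_cases h1 : c = ','
        · simp [h1, pvLoopA_build]
        · simp [h1, ih]
      | true => simp [ih]

-- ===== VERDICT (by name: the statement is the Claim_ definition above) =====
theorem get_not_local_spec : Claim_equal_get_not_local := by
  intro value _
  unfold Spec_get_not_local get_not_local get_not_local_alt
  rw [pvLoopA_seek]
  cases pvFindAfterComma (value.toList.drop 1) false <;> simp
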